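-- pv_equiv track=rewrite | github.com/kapsoura/Trend-Analytics-at-Scale | src/training_pipeline/sparkml_model_train_hdfs.py | interpret_topic_meaning
-- ===== SOURCE A (Python) =====
-- def interpret_topic_meaning(top_words):
--     words = [word for word, _ in top_words[:10]]
--     word_set = set(words)
--
--     topic_patterns = {
--         'Delivery & Shipping': {'delivery', 'shipping', 'arrived', 'package', 'delayed', 'received', 'courier'},
--         'Price & Value': {'purchase', 'price', 'expensive', 'cheap', 'cost', 'money', 'affordable', 'budget', 'deal', 'rupees', 'rs', 'value', 'money', 'penny'},
--         'Customer Service': {'service', 'support', 'help', 'staff', 'call', 'response', 'representative', 'care'},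
--         'Product Features': {'battery', 'camera', 'screen', 'memory', 'color', 'design', 'feature', 'specification', 'display', 'sound', 'machine'},
--         'Product Quality': {'quality', 'defective', 'durable', 'broken', 'damaged', 'condition', 'build', 'product'},
--         'General Sentiment': {'excellent', 'good', 'bad', 'nice', 'best', 'worst', 'great', 'awesome', 'terrific', 'fabulous', 'super', 'poor', 'perfect'}
--     }
--
--     best_match = None
--     max_overlap = 0
--
--     for topic_name, keywords in topic_patterns.items():
--         overlap = len(word_set.intersection(keywords))
--         if overlap > max_overlap:
--             max_overlap = overlap
--             best_match = topic_name
--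
--     if max_overlap < 2:
--         best_match = f"{words[0].title()} & {words[1].title()}"
--
--     return best_match
-- ===== SOURCE B (Python) =====
-- WORD_TOPIC = {
--     'delivery': 'Delivery & Shipping', 'shipping': 'Delivery & Shipping', 'arrived': 'Delivery & Shipping',
--     'package': 'Delivery & Shipping', 'delayed': 'Delivery & Shipping', 'received': 'Delivery & Shipping',
--     'courier': 'Delivery & Shipping',
--     'purchase': 'Price & Value', 'price': 'Price & Value', 'expensive': 'Price & Value', 'cheap': 'Price & Value',
--     'cost': 'Price & Value', 'money': 'Price & Value', 'affordable': 'Price & Value', 'budget': 'Price & Value',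
--     'deal': 'Price & Value', 'rupees': 'Price & Value', 'rs': 'Price & Value', 'value': 'Price & Value',
--     'penny': 'Price & Value',
--     'service': 'Customer Service', 'support': 'Customer Service', 'help': 'Customer Service',
--     'staff': 'Customer Service', 'call': 'Customer Service', 'response': 'Customer Service',
--     'representative': 'Customer Service', 'care': 'Customer Service',
--     'battery': 'Product Features', 'camera': 'Product Features', 'screen': 'Product Features',
--     'memory': 'Product Features', 'color': 'Product Features', 'design': 'Product Features',
--     'feature': 'Product Features', 'specification': 'Product Features', 'display': 'Product Features',
--     'sound': 'Product Features', 'machine': 'Product Features',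
--     'quality': 'Product Quality', 'defective': 'Product Quality', 'durable': 'Product Quality',
--     'broken': 'Product Quality', 'damaged': 'Product Quality', 'condition': 'Product Quality',
--     'build': 'Product Quality', 'product': 'Product Quality',
--     'excellent': 'General Sentiment', 'good': 'General Sentiment', 'bad': 'General Sentiment',
--     'nice': 'General Sentiment', 'best': 'General Sentiment', 'worst': 'General Sentiment',
--     'great': 'General Sentiment', 'awesome': 'General Sentiment', 'terrific': 'General Sentiment',
--     'fabulous': 'General Sentiment', 'super': 'General Sentiment', 'poor': 'General Sentiment',
--     'perfect': 'General Sentiment',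
-- }
--
-- TOPIC_NAMES = ['Delivery & Shipping', 'Price & Value', 'Customer Service',
--                'Product Features', 'Product Quality', 'General Sentiment']
--
--
-- def interpret_topic_meaning(top_words):
--     words = [word for word, _ in top_words[:10]]
--     # topics hit by the distinct top words, via the inverted index
--     hits = [WORD_TOPIC[w] for w in set(words) if w in WORD_TOPIC]
--     counts = [hits.count(name) for name in TOPIC_NAMES]
--     m = max(counts)
--     if m < 2:
--         return " & ".join(w.title() for w in words[:2])
--     # first topic (declaration order) attaining the maximal count
--     return TOPIC_NAMES[counts.index(m)]
-- ===== Notes on version B (the rewrite author's own statement) =====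
-- stated objective: idiomatic
-- what changed: Replaces A's per-topic set-intersection fold with a flat keyword-to-topic inverted index: one pass collects the topics hit by the distinct top words, a per-topic count list is taken, and the winner is chosen by max plus first-index (reproducing the strict-'>' declaration-order tie-break); the two-word title fallback is built with ' & '.join.
import Mathlib
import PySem

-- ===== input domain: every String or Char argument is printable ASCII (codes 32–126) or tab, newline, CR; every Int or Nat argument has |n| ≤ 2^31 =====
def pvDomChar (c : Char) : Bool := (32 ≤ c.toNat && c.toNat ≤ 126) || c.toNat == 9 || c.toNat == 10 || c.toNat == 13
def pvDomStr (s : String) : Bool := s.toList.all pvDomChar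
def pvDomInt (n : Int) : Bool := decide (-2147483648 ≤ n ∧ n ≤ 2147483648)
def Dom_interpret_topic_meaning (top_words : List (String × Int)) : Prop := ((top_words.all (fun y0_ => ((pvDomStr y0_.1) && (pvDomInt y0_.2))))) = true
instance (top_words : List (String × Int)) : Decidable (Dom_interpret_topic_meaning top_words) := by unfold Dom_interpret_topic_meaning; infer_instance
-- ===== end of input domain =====

-- B replaces A's per-topic set-intersection loop with a flat keyword→topic inverted index:
-- it collects the topics hit by the distinct top words, takes a per-topic count list, and
-- selects via max/first-index (same strict-'>' tie-break); a more idiomatic decomposition.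

-- ===== PORT A =====

-- str.title(), hand-ported (PySem has no title); exact on the ASCII domain, where Python's
-- "cased" characters are exactly the letters a-z / A-Z.
def pvIsAlphaA (c : Char) : Bool := (97 ≤ c.toNat && c.toNat ≤ 122) || (65 ≤ c.toNat && c.toNat ≤ 90)
def pvUpCharA (c : Char) : Char := if 97 ≤ c.toNat && c.toNat ≤ 122 then Char.ofNat (c.toNat - 32) else c
def pvLowCharA (c : Char) : Char := if 65 ≤ c.toNat && c.toNat ≤ 90 then Char.ofNat (c.toNat + 32) else c
def pvTitleGoA : List Char → Bool → List Char
  | [], _ => []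
  | c :: rest, prev =>
    (if pvIsAlphaA c then (if prev then pvLowCharA c else pvUpCharA c) else c) :: pvTitleGoA rest (pvIsAlphaA c)
def pvTitleA (s : String) : String := String.ofList (pvTitleGoA s.toList false)

-- A's dict literal 'topic_patterns' (the duplicate 'money' of the Python set literal kept).
def pvTopicPatterns : PySem.Dict String (PySem.Set String) := PySem.Dict.mk
  [ ("Delivery & Shipping", PySem.Set.ofList ["delivery", "shipping", "arrived", "package", "delayed", "received", "courier"])
  , ("Price & Value", PySem.Set.ofList ["purchase", "price", "expensive", "cheap", "cost", "money", "affordable", "budget", "deal", "rupees", "rs", "value", "money", "penny"])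
  , ("Customer Service", PySem.Set.ofList ["service", "support", "help", "staff", "call", "response", "representative", "care"])
  , ("Product Features", PySem.Set.ofList ["battery", "camera", "screen", "memory", "color", "design", "feature", "specification", "display", "sound", "machine"])
  , ("Product Quality", PySem.Set.ofList ["quality", "defective", "durable", "broken", "damaged", "condition", "build", "product"])
  , ("General Sentiment", PySem.Set.ofList ["excellent", "good", "bad", "nice", "best", "worst", "great", "awesome", "terrific", "fabulous", "super", "poor", "perfect"]) ]

-- words[0] / words[1]: Python raises IndexError when absent (excluded by Pre_)
def pvFallbackA (words : List String) : String :=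
  match PySem.List.pyGet? words 0, PySem.List.pyGet? words 1 with
  | some w0, some w1 => pvTitleA w0 ++ " & " ++ pvTitleA w1
  | _, _ => ""

def interpret_topic_meaning (top_words : List (String × Int)) : String :=
  let words := (PySem.List.slice top_words none (some 10)).map (fun p => p.1)
  let word_set : PySem.Set String := PySem.Set.ofList words
  let r := pvTopicPatterns.items.foldl
    (fun (s : Option String × Int) tk =>
      if ((PySem.Set.inter word_set tk.2).length : Int) > s.2
      then (some tk.1, ((PySem.Set.inter word_set tk.2).length : Int)) else s)
    (none, 0)
  if r.2 < 2 then pvFallbackA words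
  else r.1.getD ""

-- ===== PORT B =====

-- Source B's flat WORD_TOPIC inverted-index literal.
def pvWordTopic : PySem.Dict String String := PySem.Dict.mk
  [ ("delivery", "Delivery & Shipping"), ("shipping", "Delivery & Shipping"), ("arrived", "Delivery & Shipping"), ("package", "Delivery & Shipping"), ("delayed", "Delivery & Shipping"), ("received", "Delivery & Shipping"), ("courier", "Delivery & Shipping")
  , ("purchase", "Price & Value"), ("price", "Price & Value"), ("expensive", "Price & Value"), ("cheap", "Price & Value"), ("cost", "Price & Value"), ("money", "Price & Value"), ("affordable", "Price & Value"), ("budget", "Price & Value"), ("deal", "Price & Value"), ("rupees", "Price & Value"), ("rs", "Price & Value"), ("value", "Price & Value"), ("penny", "Price & Value")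
  , ("service", "Customer Service"), ("support", "Customer Service"), ("help", "Customer Service"), ("staff", "Customer Service"), ("call", "Customer Service"), ("response", "Customer Service"), ("representative", "Customer Service"), ("care", "Customer Service")
  , ("battery", "Product Features"), ("camera", "Product Features"), ("screen", "Product Features"), ("memory", "Product Features"), ("color", "Product Features"), ("design", "Product Features"), ("feature", "Product Features"), ("specification", "Product Features"), ("display", "Product Features"), ("sound", "Product Features"), ("machine", "Product Features")
  , ("quality", "Product Quality"), ("defective", "Product Quality"), ("durable", "Product Quality"), ("broken", "Product Quality"), ("damaged", "Product Quality"), ("condition", "Product Quality"), ("build", "Product Quality"), ("product", "Product Quality")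
  , ("excellent", "General Sentiment"), ("good", "General Sentiment"), ("bad", "General Sentiment"), ("nice", "General Sentiment"), ("best", "General Sentiment"), ("worst", "General Sentiment"), ("great", "General Sentiment"), ("awesome", "General Sentiment"), ("terrific", "General Sentiment"), ("fabulous", "General Sentiment"), ("super", "General Sentiment"), ("poor", "General Sentiment"), ("perfect", "General Sentiment") ]

-- Source B's TOPIC_NAMES literal.
def pvTopicNames : List String :=
  ["Delivery & Shipping", "Price & Value", "Customer Service", "Product Features", "Product Quality", "General Sentiment"]

-- str.title() for B, hand-ported as a single left fold carrying (output, previous-char-cased);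
-- exact on the ASCII domain, where Python's "cased" characters are exactly a-z / A-Z.
def pvTitleB (s : String) : String :=
  String.ofList
    ((s.toList.foldl
        (fun (st : List Char × Bool) c =>
          let isLow := (97 ≤ c.toNat && c.toNat ≤ 122)
          let isUp := (65 ≤ c.toNat && c.toNat ≤ 90)
          let o := if st.2 then (if isUp then Char.ofNat (c.toNat + 32) else c)
                   else (if isLow then Char.ofNat (c.toNat - 32) else c)
          (st.1 ++ [o], isLow || isUp))
        ([], false)).1)

def interpret_topic_meaning_alt (top_words : List (String × Int)) : String :=
  let words := (PySem.List.slice top_words none (some 10)).map (fun p => p.1)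
  let hits := (PySem.Set.ofList words).filterMap (fun w => PySem.Dict.get? pvWordTopic w)
  let counts : List Int := pvTopicNames.map (fun name => ((PySem.List.count hits name : Nat) : Int))
  match PySem.List.max? counts (fun x => x) with
  | none => ""    -- unreachable: counts always has 6 entries (Python's max would raise on [])
  | some m =>
    if m < 2 then PySem.Str.join " & " ((PySem.List.slice words none (some 2)).map pvTitleB)
    else
      match PySem.List.index? counts m with
      | some i =>
        match PySem.List.pyGet? pvTopicNames (i : Int) with
        | some name => name
        | none => ""
      | none => ""

-- ===== PRECONDITION & SPEC =====
-- A raises IndexError (fallback f-string indexes words[1]) exactly when top_words has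
-- fewer than 2 entries: with at most one distinct word no overlap can reach 2.
def Pre_interpret_topic_meaning (top_words : List (String × Int)) : Prop := 2 ≤ top_words.length
instance (top_words : List (String × Int)) : Decidable (Pre_interpret_topic_meaning top_words) := by unfold Pre_interpret_topic_meaning; infer_instance

def pvWitness_interpret_topic_meaning : (List (String × Int)) := [("price", 1), ("cost", 2)]

def Spec_interpret_topic_meaning (top_words : List (String × Int)) (out : String) : Prop := out = interpret_topic_meaning_alt top_words
instance (top_words : List (String × Int)) (out : String) : Decidable (Spec_interpret_topic_meaning top_words out) := by unfold Spec_interpret_topic_meaning; infer_instance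

-- ===== CLAIM (what is proved, stated in full; the proofs are below) =====
def Claim_equal_interpret_topic_meaning : Prop := ∀ (top_words : List (String × Int)), Dom_interpret_topic_meaning top_words → Pre_interpret_topic_meaning top_words → Spec_interpret_topic_meaning top_words (interpret_topic_meaning top_words)

-- ===== LEMMAS AND PROOFS =====

-- A's dict in iteration order, the duplicate 'money' dedupped by set(), as a plain pair list.
def pvItemsL : List (String × List String) :=
  [ ("Delivery & Shipping", ["delivery", "shipping", "arrived", "package", "delayed", "received", "courier"])
  , ("Price & Value", ["purchase", "price", "expensive", "cheap", "cost", "money", "affordable", "budget", "deal", "rupees", "rs", "value", "penny"])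
  , ("Customer Service", ["service", "support", "help", "staff", "call", "response", "representative", "care"])
  , ("Product Features", ["battery", "camera", "screen", "memory", "color", "design", "feature", "specification", "display", "sound", "machine"])
  , ("Product Quality", ["quality", "defective", "durable", "broken", "damaged", "condition", "build", "product"])
  , ("General Sentiment", ["excellent", "good", "bad", "nice", "best", "worst", "great", "awesome", "terrific", "fabulous", "super", "poor", "perfect"]) ]

set_option maxRecDepth 8192 in
lemma pvItems_eq : pvTopicPatterns.items = pvItemsL := by decide

set_option maxRecDepth 8192 in
lemma pvNames_eq : pvTopicNames = pvItemsL.map Prod.fst := by decide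

-- looking a word up in the inverted index and matching a topic name = membership in that topic's keywords
set_option maxRecDepth 16384 in
set_option maxHeartbeats 1600000 in
lemma pvLook (w : String) :
    ∀ tk ∈ pvItemsL, (PySem.Dict.get? pvWordTopic w == some tk.1) = tk.2.contains w := by
  unfold PySem.Dict.get?
  cases hf : List.find? (fun p => p.1 == w) pvWordTopic.items with
  | none =>
    intro tk htk
    cases hc : tk.2.contains w with
    | false => simp
    | true =>
      exfalso
      have hmem : w ∈ tk.2 := by simpa using hc
      fin_cases htk <;> fin_cases hmem <;> exact absurd hf (by decide)
  | some p =>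
    have hpw : p.1 = w := by
      have := List.find?_some hf
      exact eq_of_beq (by simpa using this)
    subst hpw
    have hmem := List.mem_of_find?_eq_some hf
    fin_cases hmem <;> decide

-- B's per-topic count over the distinct words = A's intersection size, topic by topic
lemma pvCountVal (u : List String) (tk : String × List String) (htk : tk ∈ pvItemsL) :
    ((PySem.List.count (u.filterMap (fun w => PySem.Dict.get? pvWordTopic w)) tk.1 : Nat) : Int)
      = ((PySem.Set.inter u tk.2).length : Int) := by
  congr 1
  unfold PySem.List.count
  rw [List.count_filterMap]
  rw [List.countP_congr (fun w _ => by rw [pvLook w tk htk])]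
  rw [List.countP_eq_length_filter]
  rfl

lemma pvCounts_eq (u : List String) :
    pvTopicNames.map (fun name => ((PySem.List.count (u.filterMap (fun w => PySem.Dict.get? pvWordTopic w)) name : Nat) : Int))
      = pvItemsL.map (fun tk => ((PySem.Set.inter u tk.2).length : Int)) := by
  rw [pvNames_eq, List.map_map]
  exact List.map_congr_left (fun tk htk => pvCountVal u tk htk)

-- A's strict-'>' selection fold, characterised: it returns the running max together with
-- the FIRST name attaining it (or the initial candidate if nothing beats the initial max).
lemma pvSelGen (l : List (String × Int)) (b0 : Option String) (m0 : Int) :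
    l.foldl (fun (s : Option String × Int) p => if (p.2 : Int) > s.2 then (some p.1, p.2) else s) (b0, m0)
      = ((if (l.map Prod.snd).foldl max m0 > m0
           then (l.find? (fun p => p.2 == (l.map Prod.snd).foldl max m0)).map Prod.fst
           else b0),
         (l.map Prod.snd).foldl max m0) := by
  induction l generalizing b0 m0 with
  | nil => simp
  | cons p l ih =>
    obtain ⟨n, x⟩ := p
    simp only [List.foldl_cons, List.map_cons]
    by_cases hx : x > m0
    · rw [if_pos hx, ih (some n) x, max_eq_right (le_of_lt hx)]
      have hxM : x ≤ (l.map Prod.snd).foldl max x := (PySem.List.le_foldl_max _ _).1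
      rw [if_pos (lt_of_lt_of_le hx hxM)]
      by_cases hxe : x = (l.map Prod.snd).foldl max x
      · rw [if_neg (by omega), List.find?_cons_of_pos (by simp only [beq_iff_eq]; exact hxe)]
        simp
      · rw [if_pos (lt_of_le_of_ne hxM hxe),
            List.find?_cons_of_neg (by simp only [beq_iff_eq]; exact hxe)]
    · rw [if_neg hx, ih b0 m0, max_eq_left (not_lt.mp hx)]
      by_cases hM : (l.map Prod.snd).foldl max m0 > m0
      · rw [if_pos hM, if_pos hM,
            List.find?_cons_of_neg (by simp only [beq_iff_eq]; omega)]
      · rw [if_neg hM, if_neg hM]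

-- B's index?/pyGet? selection over the parallel name/count lists = first name attaining m.
lemma pvPick (l : List (String × Int)) (m : Int) :
    (match PySem.List.index? (l.map Prod.snd) m with
     | some i =>
       match PySem.List.pyGet? (l.map Prod.fst) (i : Int) with
       | some name => name
       | none => ""
     | none => "")
    = ((l.find? (fun p => p.2 == m)).map Prod.fst).getD "" := by
  induction l with
  | nil => simp [PySem.List.index?]
  | cons p l ih =>
    obtain ⟨n, x⟩ := p
    simp only [List.map_cons]
    by_cases hx : x = m
    · subst hx
      rw [PySem.List.index?_cons_self, List.find?_cons_of_pos (by simp)]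
      simp
    · rw [PySem.List.index?_cons_of_ne _ hx, List.find?_cons_of_neg (by simpa using hx)]
      rw [← ih]
      cases h : PySem.List.index? (l.map Prod.snd) m with
      | none => simp
      | some i =>
        simp only [Option.map_some]
        have : ((i + 1 : Nat) : Int) = (i : Int) + 1 := by push_cast; ring
        rw [this, PySem.List.pyGet?_cons_succ]

-- the two title ports agree, character by character
lemma pvTitleChar (prev : Bool) (c : Char) :
    (if prev then (if (65 ≤ c.toNat && c.toNat ≤ 90) then Char.ofNat (c.toNat + 32) else c)
     else (if (97 ≤ c.toNat && c.toNat ≤ 122) then Char.ofNat (c.toNat - 32) else c))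
    = (if pvIsAlphaA c then (if prev then pvLowCharA c else pvUpCharA c) else c) := by
  cases prev <;> simp only [pvIsAlphaA, pvLowCharA, pvUpCharA, Bool.or_eq_true] <;>
    split_ifs <;> simp_all

lemma pvTitleLoop (l : List Char) (acc : List Char) (prev : Bool) :
    (l.foldl
        (fun (st : List Char × Bool) c =>
          let isLow := (97 ≤ c.toNat && c.toNat ≤ 122)
          let isUp := (65 ≤ c.toNat && c.toNat ≤ 90)
          let o := if st.2 then (if isUp then Char.ofNat (c.toNat + 32) else c)
                   else (if isLow then Char.ofNat (c.toNat - 32) else c)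
          (st.1 ++ [o], isLow || isUp))
        (acc, prev)).1 = acc ++ pvTitleGoA l prev := by
  induction l generalizing acc prev with
  | nil => simp [pvTitleGoA]
  | cons c r ih =>
    simp only [List.foldl_cons, pvTitleGoA]
    rw [ih]
    rw [pvTitleChar prev c]
    have : ((97 ≤ c.toNat && c.toNat ≤ 122) || (65 ≤ c.toNat && c.toNat ≤ 90)) = pvIsAlphaA c := rfl
    rw [this]
    simp

lemma pvTitle_eq (s : String) : pvTitleB s = pvTitleA s := by
  unfold pvTitleB pvTitleA
  rw [pvTitleLoop]
  simp

lemma pvJoin2 (a b : String) : PySem.Str.join " & " [a, b] = a ++ " & " ++ b := by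
  show String.ofList (PySem.Chars.join (" & ".toList) [a.toList, b.toList]) = a ++ " & " ++ b
  unfold PySem.Chars.join
  rw [show (" & ".toList).intercalate [a.toList, b.toList]
        = a.toList ++ " & ".toList ++ b.toList by simp [List.intercalate]]
  apply String.toList_inj.mp
  simp [String.toList_ofList, String.toList_append]

-- ===== VERDICT (by name: the statement is the Claim_ definition above) =====
theorem interpret_topic_meaning_spec : Claim_equal_interpret_topic_meaning := by
  intro tw _ hpre
  show interpret_topic_meaning tw = interpret_topic_meaning_alt tw
  unfold interpret_topic_meaning interpret_topic_meaning_alt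
  simp only []
  set words := (PySem.List.slice tw none (some 10)).map (fun p => p.1) with hwords
  set ws : PySem.Set String := PySem.Set.ofList words with hws
  -- name/count pair list shared by both characterisations
  set L : List (String × Int) := pvItemsL.map (fun tk => (tk.1, ((PySem.Set.inter ws tk.2).length : Int))) with hL
  -- A's fold over the items = the generic fold over L
  have hAfold : pvTopicPatterns.items.foldl
      (fun (s : Option String × Int) tk =>
        if ((PySem.Set.inter ws tk.2).length : Int) > s.2
        then (some tk.1, ((PySem.Set.inter ws tk.2).length : Int)) else s)
      (none, 0)
      = L.foldl (fun (s : Option String × Int) p => if (p.2 : Int) > s.2 then (some p.1, p.2) else s) (none, 0) := by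
    rw [pvItems_eq, hL, List.foldl_map]
  -- B's counts list = L's value column, B's names = L's name column
  have hcounts : pvTopicNames.map (fun name => ((PySem.List.count (ws.filterMap (fun w => PySem.Dict.get? pvWordTopic w)) name : Nat) : Int))
      = L.map Prod.snd := by
    rw [pvCounts_eq, hL, List.map_map]
    rfl
  have hnames : pvTopicNames = L.map Prod.fst := by
    rw [pvNames_eq, hL, List.map_map]
    rfl
  rw [hAfold, pvSelGen, hcounts, hnames]
  -- B's max over the (six-entry, nonnegative) counts = the fold's running max from 0
  obtain ⟨c0, crest, hcc, hc0⟩ : ∃ c0 crest, L.map Prod.snd = c0 :: crest ∧ (0:Int) ≤ c0 := by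
    rw [hL, List.map_map]
    exact ⟨_, _, rfl, Int.natCast_nonneg _⟩
  rw [hcc, PySem.List.max?_id_cons]
  simp only [List.foldl_cons, max_eq_right hc0]
  set M := crest.foldl max c0 with hM
  by_cases hM2 : M < 2
  · rw [if_pos hM2, if_pos hM2]
    -- fallback branch: words has ≥ 2 entries
    have hlen : 2 ≤ words.length := by
      have hs := PySem.List.slice_to (xs := tw) (b := (10:Int)) (by norm_num)
      have hp : 2 ≤ tw.length := hpre
      rw [hwords, hs]
      simp only [List.length_map, List.length_take]
      omega
    obtain ⟨w0, w1, t, hw⟩ : ∃ w0 w1 t, words = w0 :: w1 :: t := by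
      match words, hlen with
      | w0 :: w1 :: t, _ => exact ⟨w0, w1, t, rfl⟩
    rw [hw]
    rw [show PySem.List.slice (w0 :: w1 :: t) none (some 2) = [w0, w1] by
          have hs2 := PySem.List.slice_to (xs := (w0 :: w1 :: t)) (b := (2:Int)) (by norm_num)
          rw [hs2]; rfl]
    simp only [List.map_cons, List.map_nil]
    rw [pvJoin2, pvTitle_eq, pvTitle_eq]
    unfold pvFallbackA
    rw [PySem.List.pyGet?_zero_cons,
        show PySem.List.pyGet? (w0 :: w1 :: t) 1 = some w1 by
          rw [show (1:Int) = ((0:Nat):Int) + 1 by norm_num, PySem.List.pyGet?_cons_succ]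
          simp]
  · rw [if_neg hM2, if_neg hM2]
    have hMpos : (0:Int) < M := by omega
    rw [if_pos hMpos, ← hcc, pvPick]
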